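-- pv_equiv track=rewrite | github.com/paiv/aoc2024 | days/day8.py | part1
-- ===== SOURCE A (Python) =====
-- def part1(data):
--     lines = data.strip().splitlines()
--     grid = {(x,y):c for y,s in enumerate(lines)
--         for x,c in enumerate(s) if c != '.'}
--     names = set(grid.values())
--     w, h = len(lines[0]), len(lines)
--
--     def gen(a, b):
--         ax, ay = a
--         bx, by = b
--         x, y = (2 * ax - bx, 2 * ay - by)
--         if (0 <= x < w) and (0 <= y < h):
--             yield (x, y)
--         x, y = (2 * bx - ax, 2 * by - ay)
--         if (0 <= x < w) and (0 <= y < h):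
--             yield (x, y)
--
--     pois = set()
--     for n in names:
--         ps = [p for p,c in grid.items() if c == n]
--         for i, a in enumerate(ps):
--             for b in ps[i+1:]:
--                 for p in gen(a, b):
--                     pois.add(p)
--
--     ans = len(pois)
--     return ans
-- ===== SOURCE B (Python) =====
-- def part1(data):
--     lines = data.strip().splitlines()
--     w, h = len(lines[0]), len(lines)
--     groups = {}
--     for y, s in enumerate(lines):
--         for x, c in enumerate(s):
--             if c != '.':
--                 groups.setdefault(c, []).append((x, y))
--     pois = set()
--     for pts in groups.values():
--         for i in range(len(pts)):
--             ax, ay = pts[i]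
--             for j in range(i + 1, len(pts)):
--                 bx, by = pts[j]
--                 for px, py in ((2*ax-bx, 2*ay-by), (2*bx-ax, 2*by-ay)):
--                     if 0 <= px < w and 0 <= py < h:
--                         pois.add((px, py))
--     return len(pois)
-- ===== Notes on version B (the rewrite author's own statement) =====
-- stated objective: alternative
-- what changed: B builds the frequency->positions groups in a single pass over the grid with a dict of lists (and iterates pairs by index) instead of A's building a position->char dict and re-scanning all grid items once per distinct frequency; the dominant pairwise reflection work is the same.
import Mathlib
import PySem

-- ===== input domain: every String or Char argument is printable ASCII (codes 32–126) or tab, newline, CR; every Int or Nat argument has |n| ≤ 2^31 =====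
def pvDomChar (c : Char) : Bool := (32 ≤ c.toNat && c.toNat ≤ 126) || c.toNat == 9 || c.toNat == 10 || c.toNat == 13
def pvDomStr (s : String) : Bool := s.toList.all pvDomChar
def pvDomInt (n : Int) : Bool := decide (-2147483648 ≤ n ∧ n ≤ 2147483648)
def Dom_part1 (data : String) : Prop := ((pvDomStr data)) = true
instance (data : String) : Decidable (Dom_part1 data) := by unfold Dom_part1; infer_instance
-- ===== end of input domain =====

-- B groups the antennas by frequency in ONE pass over the grid (dict of lists) instead of
-- re-scanning the whole grid once per frequency; same pairwise reflection count (objective: alternative).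

-- ===== PORT A =====
-- gen(a, b): the two reflection candidates, each kept if inside the w×h bounds
def pvGenA (w h : Int) (a b : Int × Int) : List (Int × Int) :=
  let x1 := 2 * a.1 - b.1; let y1 := 2 * a.2 - b.2
  let x2 := 2 * b.1 - a.1; let y2 := 2 * b.2 - a.2
  (if (0 ≤ x1 ∧ x1 < w) ∧ (0 ≤ y1 ∧ y1 < h) then [(x1, y1)] else []) ++
  (if (0 ≤ x2 ∧ x2 < w) ∧ (0 ≤ y2 ∧ y2 < h) then [(x2, y2)] else [])

def part1 (data : String) : Int :=
  let lines := PySem.Str.splitlines (PySem.Str.strip data)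
  -- grid = {(x,y): c for y,s in enumerate(lines) for x,c in enumerate(s) if c != '.'}
  let grid : PySem.Dict (Int × Int) Char :=
    ((PySem.List.enumerate lines).flatMap (fun ys =>
      (PySem.List.enumerate ys.2.toList).filterMap (fun xc =>
        if xc.2 ≠ '.' then some ((xc.1, ys.1), xc.2) else none))).foldl
      (fun d kv => d.insert kv.1 kv.2) PySem.Dict.empty
  let names := PySem.Set.ofList grid.values
  -- lines[0]: total form pyGetD, exact under Pre_part1 (lines ≠ []; Python raises IndexError there)
  let w := PySem.Str.len (PySem.List.pyGetD lines 0 "")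
  let h := PySem.List.len lines
  let pois : PySem.Set (Int × Int) := names.foldl (fun pois n =>
    let ps := grid.items.filterMap (fun pc => if pc.2 == n then some pc.1 else none)
    (PySem.List.enumerate ps).foldl (fun pois ia =>
      (PySem.List.slice ps (some (ia.1 + 1)) none).foldl (fun pois b =>
        (pvGenA w h ia.2 b).foldl (fun s p => PySem.Set.add s p) pois) pois) pois)
    PySem.Set.empty
  PySem.Set.len pois

-- ===== PORT B =====
def part1_alt (data : String) : Int :=
  let lines := PySem.Str.splitlines (PySem.Str.strip data)
  -- lines[0]: total form pyGetD, exact under Pre_part1 (lines ≠ []; Python raises IndexError there)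
  let w := PySem.Str.len (PySem.List.pyGetD lines 0 "")
  let h := PySem.List.len lines
  -- one pass: groups.setdefault(c, []).append((x, y))
  let groups : PySem.Dict Char (List (Int × Int)) :=
    (PySem.List.enumerate lines).foldl (fun g ys =>
      (PySem.List.enumerate ys.2.toList).foldl (fun g xc =>
        if xc.2 ≠ '.' then g.modify xc.2 [] (fun l => l ++ [(xc.1, ys.1)]) else g) g)
      PySem.Dict.empty
  let pois : PySem.Set (Int × Int) := groups.values.foldl (fun pois pts =>
    (PySem.List.pyRange 0 (PySem.List.len pts) 1).foldl (fun pois i =>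
      let a := PySem.List.pyGetD pts i (0, 0)
      (PySem.List.pyRange (i + 1) (PySem.List.len pts) 1).foldl (fun pois j =>
        let b := PySem.List.pyGetD pts j (0, 0)
        [(2 * a.1 - b.1, 2 * a.2 - b.2), (2 * b.1 - a.1, 2 * b.2 - a.2)].foldl (fun pois p =>
          if (0 ≤ p.1 ∧ p.1 < w) ∧ (0 ≤ p.2 ∧ p.2 < h) then PySem.Set.add pois p else pois)
          pois) pois) pois) PySem.Set.empty
  PySem.Set.len pois

-- ===== PRECONDITION & SPEC =====
-- Pre_ excludes inputs whose stripped text has no lines: there both Pythons raise IndexError on lines[0].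
def Pre_part1 (data : String) : Prop := PySem.Str.splitlines (PySem.Str.strip data) ≠ []
instance (data : String) : Decidable (Pre_part1 data) := by unfold Pre_part1; infer_instance
def pvWitness_part1 : String := "aa"

def Spec_part1 (data : String) (out : Int) : Prop := out = part1_alt data
instance (data : String) (out : Int) : Decidable (Spec_part1 data out) := by unfold Spec_part1; infer_instance

-- ===== CLAIM (what is proved, stated in full; the proofs are below) =====
def Claim_equal_part1 : Prop := ∀ (data : String), Dom_part1 data → Pre_part1 data → Spec_part1 data (part1 data)

-- ===== LEMMAS AND PROOFS =====

-- proof-only helper definitions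
def pvCells (lines : List String) : List ((Int × Int) × Char) :=
  (PySem.List.enumerate lines).flatMap (fun ys =>
    (PySem.List.enumerate ys.2.toList).filterMap (fun xc =>
      if xc.2 ≠ '.' then some ((xc.1, ys.1), xc.2) else none))

def pvPs (l : List ((Int × Int) × Char)) (c : Char) : List (Int × Int) :=
  (l.filter (fun pc => pc.2 == c)).map (·.1)

-- all unordered pairs (i < j) of a list, in order
def pvPairs {α : Type} : List α → List (α × α)
  | [] => []
  | a :: t => t.map (fun b => (a, b)) ++ pvPairs t

theorem pv_enumerate_cons {α : Type} (x : α) (t : List α) (s : Int) :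
    PySem.List.enumerate (x :: t) s = (s, x) :: PySem.List.enumerate t (s + 1) := rfl

theorem pv_idx_fold {α : Type} (full : List (Int × Int)) (g : α → (Int × Int) → α) :
    ∀ (t : List (Int × Int)) (pre : Nat), full.drop pre = t → ∀ (acc : α),
    (PySem.List.pyRange (pre : Int) (PySem.List.len full) 1).foldl
        (fun acc j => g acc (PySem.List.pyGetD full j (0, 0))) acc
      = t.foldl g acc := by
  intro t
  induction t with
  | nil =>
    intro pre h acc
    have hlen : full.length ≤ pre := by
      have := congrArg List.length h
      simp [List.length_drop] at this; omega
    rw [PySem.List.pyRange_one_eq_nil (by simp [PySem.List.len_eq]; omega)]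
    rfl
  | cons b t ih =>
    intro pre h acc
    have hpre : pre < full.length := by
      by_contra hc
      rw [List.drop_eq_nil_of_le (by omega)] at h; simp at h
    have hb : full[pre]'hpre = b := by
      have : (full.drop pre)[0]'(by simp [h]) = b := by simp [h]
      rw [List.getElem_drop] at this; simpa using this
    rw [PySem.List.pyRange_one_cons (by simp [PySem.List.len_eq]; omega)]
    rw [List.foldl_cons]
    have hget : PySem.List.pyGetD full (pre : Int) (0, 0) = b := by
      rw [PySem.List.pyGetD_natCast]
      simp [List.getD, hb, List.getElem?_eq_getElem hpre]
    rw [hget]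
    have h' : full.drop (pre + 1) = t := by
      rw [List.drop_add_one_eq_tail_drop, h]; rfl
    have := ih (pre + 1) h' (g acc b)
    push_cast at this
    rw [this]; rfl

theorem pv_loopB (w h : Int) (full : List (Int × Int)) :
    ∀ (t : List (Int × Int)) (pre : Nat), full.drop pre = t → ∀ pois,
    (PySem.List.pyRange (pre : Int) (PySem.List.len full) 1).foldl (fun pois i =>
        (PySem.List.pyRange (i + 1) (PySem.List.len full) 1).foldl (fun pois j =>
          [(2 * (PySem.List.pyGetD full i (0, 0)).1 - (PySem.List.pyGetD full j (0, 0)).1,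
            2 * (PySem.List.pyGetD full i (0, 0)).2 - (PySem.List.pyGetD full j (0, 0)).2),
           (2 * (PySem.List.pyGetD full j (0, 0)).1 - (PySem.List.pyGetD full i (0, 0)).1,
            2 * (PySem.List.pyGetD full j (0, 0)).2 - (PySem.List.pyGetD full i (0, 0)).2)].foldl (fun pois p =>
            if (0 ≤ p.1 ∧ p.1 < w) ∧ (0 ≤ p.2 ∧ p.2 < h) then PySem.Set.add pois p else pois)
            pois) pois) pois
      = (pvPairs t).foldl (fun pois ab =>
          [(2 * ab.1.1 - ab.2.1, 2 * ab.1.2 - ab.2.2), (2 * ab.2.1 - ab.1.1, 2 * ab.2.2 - ab.1.2)].foldl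
            (fun pois p => if (0 ≤ p.1 ∧ p.1 < w) ∧ (0 ≤ p.2 ∧ p.2 < h)
              then PySem.Set.add pois p else pois) pois) pois := by
  intro t
  induction t with
  | nil =>
    intro pre hd pois
    have hlen : full.length ≤ pre := by
      have := congrArg List.length hd; simp [List.length_drop] at this; omega
    rw [PySem.List.pyRange_one_eq_nil (by simp [PySem.List.len_eq]; omega)]
    rfl
  | cons a t ih =>
    intro pre hd pois
    have hpre : pre < full.length := by
      by_contra hc
      rw [List.drop_eq_nil_of_le (by omega)] at hd; simp at hd
    have hb : full[pre]'hpre = a := by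
      have : (full.drop pre)[0]'(by simp [hd]) = a := by simp [hd]
      rw [List.getElem_drop] at this; simpa using this
    have hget : PySem.List.pyGetD full (pre : Int) (0, 0) = a := by
      rw [PySem.List.pyGetD_natCast]
      simp [List.getD, hb, List.getElem?_eq_getElem hpre]
    have h' : full.drop (pre + 1) = t := by
      rw [List.drop_add_one_eq_tail_drop, hd]; rfl
    rw [PySem.List.pyRange_one_cons (by simp [PySem.List.len_eq]; omega)]
    rw [List.foldl_cons]
    simp only [hget]
    have hinner := pv_idx_fold full
      (fun pois b =>
        [(2 * (PySem.List.pyGetD full (pre : Int) (0, 0)).1 - b.1,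
          2 * (PySem.List.pyGetD full (pre : Int) (0, 0)).2 - b.2),
         (2 * b.1 - (PySem.List.pyGetD full (pre : Int) (0, 0)).1,
          2 * b.2 - (PySem.List.pyGetD full (pre : Int) (0, 0)).2)].foldl (fun pois p =>
            if (0 ≤ p.1 ∧ p.1 < w) ∧ (0 ≤ p.2 ∧ p.2 < h) then PySem.Set.add pois p else pois)
            pois) t (pre + 1) h' pois
    push_cast at hinner
    simp only [hget] at hinner
    rw [hinner]
    have hih := ih (pre + 1) h' (t.foldl (fun pois b =>
        [(2 * a.1 - b.1, 2 * a.2 - b.2), (2 * b.1 - a.1, 2 * b.2 - a.2)].foldl (fun pois p =>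
            if (0 ≤ p.1 ∧ p.1 < w) ∧ (0 ≤ p.2 ∧ p.2 < h) then PySem.Set.add pois p else pois)
            pois) pois)
    push_cast at hih
    rw [hih]
    show _ = (pvPairs (a :: t)).foldl _ pois
    rw [pvPairs, List.foldl_append, List.foldl_map]

theorem pv_loopA (w h : Int) (full : List (Int × Int)) :
    ∀ (t : List (Int × Int)) (pre : Nat), full.drop pre = t → ∀ pois,
    (PySem.List.enumerate t (pre : Int)).foldl (fun pois ia =>
        (PySem.List.slice full (some (ia.1 + 1)) none).foldl (fun pois b =>
          (pvGenA w h ia.2 b).foldl (fun s p => PySem.Set.add s p) pois) pois) pois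
      = (pvPairs t).foldl (fun pois ab =>
          (pvGenA w h ab.1 ab.2).foldl (fun s p => PySem.Set.add s p) pois) pois := by
  intro t
  induction t with
  | nil => intro pre hd pois; rfl
  | cons a t ih =>
    intro pre hd pois
    have h' : full.drop (pre + 1) = t := by
      rw [List.drop_add_one_eq_tail_drop, hd]; rfl
    rw [pv_enumerate_cons, List.foldl_cons]
    have hslice : PySem.List.slice full (some ((pre : Int) + 1)) none = t := by
      have : ((pre : Int) + 1) = ((pre + 1 : Nat) : Int) := by push_cast; ring
      rw [this, PySem.List.slice_from_natCast, h']
    rw [hslice]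
    have hih := ih (pre + 1) h' (t.foldl (fun pois b =>
        (pvGenA w h a b).foldl (fun s p => PySem.Set.add s p) pois) pois)
    push_cast at hih
    rw [hih]
    show _ = (pvPairs (a :: t)).foldl _ pois
    rw [pvPairs, List.foldl_append, List.foldl_map]

theorem pv_ps_append (l : List ((Int × Int) × Char)) (kv : (Int × Int) × Char) (c : Char) :
    pvPs (l ++ [kv]) c = pvPs l c ++ (if kv.2 == c then [kv.1] else []) := by
  simp only [pvPs, List.filter_append, List.map_append]
  congr 1
  by_cases h : kv.2 == c <;> simp [h]

theorem pv_ps_eq_nil_of_not_mem (l : List ((Int × Int) × Char)) (c : Char)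
    (h : c ∉ l.map (·.2)) : pvPs l c = [] := by
  simp only [pvPs, List.map_eq_nil_iff, List.filter_eq_nil_iff]
  intro pc hpc hbeq
  exact h (List.mem_map.2 ⟨pc, hpc, by simpa using hbeq⟩)

theorem pv_dict_of_nodup {κ ν : Type} [BEq κ] [LawfulBEq κ] (l : List (κ × ν))
    (h : (l.map (·.1)).Nodup) :
    (l.foldl (fun d kv => d.insert kv.1 kv.2) PySem.Dict.empty).items = l := by
  induction l using List.reverseRecOn with
  | nil => rfl
  | append_singleton l kv ih =>
    rw [List.foldl_append, List.foldl_cons, List.foldl_nil]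
    have h' : (l.map (·.1)).Nodup := by rw [List.map_append] at h; exact h.sublist (List.sublist_append_left _ _)
    have hitems := ih h'
    have hnc : (l.foldl (fun d kv => d.insert kv.1 kv.2) PySem.Dict.empty).contains kv.1 = false := by
      rw [Bool.eq_false_iff]
      intro hc
      have := (PySem.Dict.contains_iff_mem_keys _ _).1 hc
      rw [PySem.Dict.keys, hitems] at this
      rw [List.map_append, List.nodup_append] at h
      rcases h with ⟨-, -, hdisj⟩
      exact hdisj kv.1 this kv.1 (by simp) rfl
    rw [PySem.Dict.items_insert_of_not_contains _ _ hnc, hitems]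

theorem pv_groups_items (l : List ((Int × Int) × Char)) :
    (l.foldl (fun g kv => g.modify kv.2 [] (fun t => t ++ [kv.1])) PySem.Dict.empty).items
      = (PySem.Set.ofList (l.map (·.2))).map (fun c => (c, pvPs l c)) := by
  induction l using List.reverseRecOn with
  | nil => rfl
  | append_singleton l kv ih =>
    rw [List.foldl_append, List.foldl_cons, List.foldl_nil]
    set G := l.foldl (fun g kv => g.modify kv.2 [] (fun t => t ++ [kv.1])) PySem.Dict.empty with hG
    have hkeys : G.keys = PySem.Set.ofList (l.map (·.2)) := by
      rw [PySem.Dict.keys, ih, List.map_map]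
      have hcomp : ((fun x : Char × List (Int × Int) => x.1) ∘ fun c => (c, pvPs l c)) = fun c => c := rfl
      rw [hcomp]; simp
    have hknd : G.keys.Nodup := by rw [hkeys]; exact PySem.Set.nodup_ofList _
    have hgetD : G.getD kv.2 [] = pvPs l kv.2 := by
      by_cases hm : kv.2 ∈ l.map (·.2)
      · have hmem : (kv.2, pvPs l kv.2) ∈ G.items := by
          rw [ih]
          exact List.mem_map.2 ⟨kv.2, (PySem.Set.mem_ofList _ _).2 hm, rfl⟩
        exact PySem.Dict.getD_of_mem_items _ hmem hknd []
      · have hnc : G.contains kv.2 = false := by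
          rw [Bool.eq_false_iff]
          intro hc
          exact hm (by
            have := (PySem.Dict.contains_iff_mem_keys _ _).1 hc
            rw [hkeys] at this
            exact (PySem.Set.mem_ofList _ _).1 this)
        rw [PySem.Dict.getD_of_not_contains _ _ hnc, pv_ps_eq_nil_of_not_mem l kv.2 hm]
    have hmod : G.modify kv.2 [] (fun t => t ++ [kv.1]) = G.insert kv.2 (pvPs l kv.2 ++ [kv.1]) := by
      rw [PySem.Dict.modify, hgetD]
    rw [hmod]
    by_cases hm : kv.2 ∈ l.map (·.2)
    · have hc : G.contains kv.2 = true :=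
        (PySem.Dict.contains_iff_mem_keys _ _).2 (by rw [hkeys]; exact (PySem.Set.mem_ofList _ _).2 hm)
      rw [PySem.Dict.items_insert_of_contains _ _ hc, ih, List.map_map]
      have hnames : PySem.Set.ofList ((l ++ [kv]).map (·.2)) = PySem.Set.ofList (l.map (·.2)) := by
        rw [List.map_append]
        simp only [List.map_cons, List.map_nil]
        rw [PySem.Set.ofList_append_singleton, PySem.Set.add_of_mem]
        exact (PySem.Set.mem_ofList _ _).2 hm
      rw [hnames]
      refine List.map_congr_left (fun c hc' => ?_)
      by_cases hceq : c = kv.2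
      · subst hceq
        simp [pv_ps_append]
      · simp [Function.comp, hceq, pv_ps_append, (by simpa [eq_comm] using hceq : ¬ kv.2 = c)]
    · have hc : G.contains kv.2 = false := by
        rw [Bool.eq_false_iff]
        intro hc
        exact hm (by
          have := (PySem.Dict.contains_iff_mem_keys _ _).1 hc
          rw [hkeys] at this
          exact (PySem.Set.mem_ofList _ _).1 this)
      rw [PySem.Dict.items_insert_of_not_contains _ _ hc, ih]
      have hnames : PySem.Set.ofList ((l ++ [kv]).map (·.2))
          = PySem.Set.ofList (l.map (·.2)) ++ [kv.2] := by
        rw [List.map_append]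
        simp only [List.map_cons, List.map_nil]
        rw [PySem.Set.ofList_append_singleton, PySem.Set.add_of_not_mem]
        intro hmem
        exact hm ((PySem.Set.mem_ofList _ _).1 hmem)
      rw [hnames, List.map_append]
      congr 1
      · refine List.map_congr_left (fun c hc' => ?_)
        have hne : kv.2 ≠ c := by
          intro he
          exact hm (by rw [he]; exact (PySem.Set.mem_ofList _ _).1 hc')
        simp [pv_ps_append, hne]
      · simp [pv_ps_append, pv_ps_eq_nil_of_not_mem l kv.2 hm]

theorem pv_mem_enumerate_fst {α : Type} (t : List α) (s i : Int) (x : α)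
    (h : (i, x) ∈ PySem.List.enumerate t s) : s ≤ i := by
  induction t generalizing s with
  | nil => simp [PySem.List.enumerate] at h
  | cons y t ih =>
    rw [pv_enumerate_cons] at h
    rcases List.mem_cons.1 h with h | h
    · simp at h; omega
    · have := ih (s + 1) h; omega

theorem pv_enumerate_pairwise {α : Type} (t : List α) (s : Int) :
    (PySem.List.enumerate t s).Pairwise (fun p q => p.1 < q.1) := by
  induction t generalizing s with
  | nil => simp [PySem.List.enumerate]
  | cons y t ih =>
    rw [pv_enumerate_cons]
    refine List.Pairwise.cons (fun q hq => ?_) (ih (s + 1))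
    have := pv_mem_enumerate_fst t (s + 1) q.1 q.2 (by simpa using hq)
    omega

theorem pv_key_mem (ys : Int × String) (k : (Int × Int))
    (h : k ∈ (List.map (fun x => x.1)
      ((PySem.List.enumerate ys.2.toList).filterMap
        (fun xc => if xc.2 ≠ '.' then some ((xc.1, ys.1), xc.2) else none)))) :
    k.2 = ys.1 := by
  rcases List.mem_map.1 h with ⟨pc, hpc, hk⟩
  rcases List.mem_filterMap.1 hpc with ⟨xc, _, hxc⟩
  by_cases hd : xc.2 ≠ '.' <;> simp [hd] at hxc
  rw [← hk, ← hxc]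

theorem pv_filterMap_ite {α β : Type} (l : List α) (p : α → Prop) [DecidablePred p] (f : α → β) :
    l.filterMap (fun x => if p x then some (f x) else none)
      = (l.filter (fun x => decide (p x))).map f := by
  induction l with
  | nil => rfl
  | cons x t ih => by_cases h : p x <;> simp [h, ih]

theorem pv_cells_keys_nodup (lines : List String) : ((pvCells lines).map (·.1)).Nodup := by
  rw [pvCells, List.map_flatMap]
  rw [List.nodup_flatMap]
  constructor
  · intro ys _
    rw [pv_filterMap_ite (PySem.List.enumerate ys.2.toList)
        (fun xc : Int × Char => xc.2 ≠ '.') (fun xc => ((xc.1, ys.1), xc.2)), List.map_map]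
    have hpw : ((PySem.List.enumerate ys.2.toList 0).filter
        (fun xc => decide (xc.2 ≠ '.'))).Pairwise (fun p q => p.1 < q.1) :=
      (pv_enumerate_pairwise _ 0).sublist List.filter_sublist
    have := hpw.map (f := (fun x => x.1) ∘ fun xc : Int × Char => ((xc.1, ys.1), xc.2))
      (S := fun (p q : Int × Int) => p ≠ q) (by
        intro a b hab
        simp only [Function.comp]
        intro he
        have := congrArg Prod.fst he
        simp at this; omega)
    exact this
  · have hpw := pv_enumerate_pairwise lines 0
    refine hpw.imp ?_
    intro ys zs hlt k hk1 hk2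
    have h1 := pv_key_mem ys k hk1
    have h2 := pv_key_mem zs k hk2
    omega

theorem pv_foldl_ite {α β γ : Type} (l : List α) (p : α → Prop) [DecidablePred p]
    (q : α → β) (f : γ → β → γ) (acc : γ) :
    l.foldl (fun g x => if p x then f g (q x) else g) acc
      = (l.filterMap (fun x => if p x then some (q x) else none)).foldl f acc := by
  rw [pv_filterMap_ite, List.foldl_map, PySem.List.foldl_ite_eq_foldl_filter]

theorem pv_gen_step (w h : Int) (a b : Int × Int) (pois : PySem.Set (Int × Int)) :
    (pvGenA w h a b).foldl (fun s p => PySem.Set.add s p) pois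
      = [(2 * a.1 - b.1, 2 * a.2 - b.2), (2 * b.1 - a.1, 2 * b.2 - a.2)].foldl
          (fun pois p => if (0 ≤ p.1 ∧ p.1 < w) ∧ (0 ≤ p.2 ∧ p.2 < h)
            then PySem.Set.add pois p else pois) pois := by
  simp only [pvGenA, List.foldl_cons, List.foldl_nil]
  split_ifs <;> simp

theorem pv_pois_eq (cells : List ((Int × Int) × Char))
    (hnd : (cells.map (·.1)).Nodup) (w h : Int) :
    (PySem.Set.ofList
        ((cells.foldl (fun d kv => d.insert kv.1 kv.2) PySem.Dict.empty).values)).foldl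
      (fun pois n =>
        (PySem.List.enumerate
            ((cells.foldl (fun d kv => d.insert kv.1 kv.2) PySem.Dict.empty).items.filterMap
              (fun pc => if (pc.2 == n) = true then some pc.1 else none))).foldl
          (fun pois ia =>
            (PySem.List.slice
                ((cells.foldl (fun d kv => d.insert kv.1 kv.2) PySem.Dict.empty).items.filterMap
                  (fun pc => if (pc.2 == n) = true then some pc.1 else none))
                (some (ia.1 + 1)) none).foldl
              (fun pois b => (pvGenA w h ia.2 b).foldl (fun s p => PySem.Set.add s p) pois)
              pois) pois) PySem.Set.empty
    = ((cells.foldl (fun g kv => g.modify kv.2 [] (fun t => t ++ [kv.1]))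
          PySem.Dict.empty).values).foldl
      (fun pois pts =>
        (PySem.List.pyRange 0 (PySem.List.len pts) 1).foldl (fun pois i =>
          (PySem.List.pyRange (i + 1) (PySem.List.len pts) 1).foldl (fun pois j =>
            [(2 * (PySem.List.pyGetD pts i (0, 0)).1 - (PySem.List.pyGetD pts j (0, 0)).1,
              2 * (PySem.List.pyGetD pts i (0, 0)).2 - (PySem.List.pyGetD pts j (0, 0)).2),
             (2 * (PySem.List.pyGetD pts j (0, 0)).1 - (PySem.List.pyGetD pts i (0, 0)).1,
              2 * (PySem.List.pyGetD pts j (0, 0)).2 - (PySem.List.pyGetD pts i (0, 0)).2)].foldl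
              (fun pois p =>
                if (0 ≤ p.1 ∧ p.1 < w) ∧ (0 ≤ p.2 ∧ p.2 < h) then PySem.Set.add pois p else pois)
              pois) pois) pois) PySem.Set.empty := by
  have hitems : (cells.foldl (fun d kv => d.insert kv.1 kv.2) PySem.Dict.empty).items = cells :=
    pv_dict_of_nodup cells hnd
  have hvals : (cells.foldl (fun d kv => d.insert kv.1 kv.2) PySem.Dict.empty).values
      = cells.map (·.2) := by rw [PySem.Dict.values, hitems]
  have hgvals : ((cells.foldl (fun g kv => g.modify kv.2 [] (fun t => t ++ [kv.1]))
      PySem.Dict.empty).values)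
      = (PySem.Set.ofList (cells.map (·.2))).map (fun c => pvPs cells c) := by
    rw [PySem.Dict.values, pv_groups_items, List.map_map]
    rfl
  rw [hvals, hgvals, List.foldl_map]
  refine PySem.List.foldl_congr_mem _ _ _ _ ?_
  intro pois n _
  have hps : ((cells.foldl (fun d kv => d.insert kv.1 kv.2) PySem.Dict.empty).items.filterMap
      (fun pc => if (pc.2 == n) = true then some pc.1 else none)) = pvPs cells n := by
    rw [hitems, pv_filterMap_ite cells (fun pc => (pc.2 == n) = true) (fun pc => pc.1), pvPs]
    exact congrArg _ (List.filter_congr (fun x _ => by by_cases hx : x.2 = n <;> simp [hx]))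
  rw [hps]
  have hA := pv_loopA w h (pvPs cells n) (pvPs cells n) 0 (by simp) pois
  push_cast at hA
  rw [hA]
  have hB := pv_loopB w h (pvPs cells n) (pvPs cells n) 0 (by simp) pois
  push_cast at hB
  rw [hB]
  refine PySem.List.foldl_congr_mem _ _ _ _ ?_
  intro pois ab _
  exact pv_gen_step w h ab.1 ab.2 pois

theorem pv_main (data : String) : part1 data = part1_alt data := by
  simp only [part1, part1_alt]
  have hgroups : ∀ (lines : List String),
      (List.foldl (fun g ys => List.foldl
        (fun g xc => if xc.2 ≠ '.' then g.modify xc.2 [] fun l => l ++ [(xc.1, ys.1)] else g) g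
        (PySem.List.enumerate ys.2.toList)) PySem.Dict.empty (PySem.List.enumerate lines))
      = (pvCells lines).foldl (fun g kv => g.modify kv.2 [] (fun t => t ++ [kv.1]))
          PySem.Dict.empty := by
    intro lines
    rw [pvCells, List.foldl_flatMap]
    refine PySem.List.foldl_congr_mem _ _ _ _ ?_
    intro acc ys _
    exact (pv_foldl_ite (PySem.List.enumerate ys.2.toList)
      (fun xc : Int × Char => xc.2 ≠ '.') (fun xc => ((xc.1, ys.1), xc.2))
      (fun g kv => g.modify kv.2 [] (fun t => t ++ [kv.1])) acc)
  rw [hgroups]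
  exact congrArg PySem.Set.len
    (pv_pois_eq (pvCells (PySem.Str.splitlines (PySem.Str.strip data)))
      (pv_cells_keys_nodup _)
      (PySem.Str.len (PySem.List.pyGetD (PySem.Str.splitlines (PySem.Str.strip data)) 0 ""))
      (PySem.List.len (PySem.Str.splitlines (PySem.Str.strip data))))

-- ===== VERDICT (by name: the statement is the Claim_ definition above) =====
theorem part1_spec : Claim_equal_part1 := by
  intro data _ _
  exact pv_main data
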